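-- pv_equiv track=rewrite | github.com/LixiaoLeo123/Malim | ru_accent_server.py | convert_plus_to_acute
-- ===== SOURCE A (Python) =====
-- def convert_plus_to_acute(text: str) -> str:
--    result = []
--    i = 0
--    while i < len(text):
--        if text[i] == '+' and i + 1 < len(text):
--            result.append(text[i + 1] + '\u0301')
--            i += 2
--        else:
--            result.append(text[i])
--            i += 1
--    return ''.join(result)
-- ===== SOURCE B (Python) =====
-- def convert_plus_to_acute(text: str) -> str:
--     ACUTE = '\u0301'
--     parts = text.split('+')
--     out = [parts[0]]
--     i = 1
--     n = len(parts)
--     while i < n: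
--         p = parts[i]
--         if p:                      # '+' accents the first char of this piece
--             out.append(p[0] + ACUTE + p[1:])
--             i += 1
--         elif i + 1 < n:            # '++': the second '+' itself gets accented
--             out.append('+' + ACUTE + parts[i + 1])
--             i += 2
--         else:                      # trailing '+' with nothing after it
--             out.append('+')
--             i += 1
--     return ''.join(out)
-- ===== Notes on version B (the rewrite author's own statement) =====
-- stated objective: faster
-- what changed: Replaces A's char-by-char index loop (with its manual two-position skip) by str.split on the marker followed by a single pass over the resulting pieces: each later piece lost its leading marker, so its first char gets the accent; an empty piece means two adjacent markers, whose second one is itself accented and the following piece copied verbatim; a trailing empty piece is the unpaired final marker, kept as-is.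
import Mathlib
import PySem

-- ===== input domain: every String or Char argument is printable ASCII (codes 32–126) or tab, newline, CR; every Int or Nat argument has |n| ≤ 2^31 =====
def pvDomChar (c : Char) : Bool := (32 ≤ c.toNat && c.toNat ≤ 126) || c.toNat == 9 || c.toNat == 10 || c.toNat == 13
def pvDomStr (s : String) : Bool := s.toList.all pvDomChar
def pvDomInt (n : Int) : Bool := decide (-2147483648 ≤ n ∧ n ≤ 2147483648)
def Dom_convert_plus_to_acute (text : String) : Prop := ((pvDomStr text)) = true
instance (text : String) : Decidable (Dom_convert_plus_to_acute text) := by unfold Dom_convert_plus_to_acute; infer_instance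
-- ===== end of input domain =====

-- B replaces A's char-by-char index loop by split-on-the-marker followed by one pass over the pieces (objective: faster, measured).

-- ===== PORT A =====
-- A's while loop over indices, as the obvious structural recursion over the remaining characters:
-- '+' with a following char emits that char plus U+0301 and skips two; otherwise the char is copied.
def convertPlusGoA : List Char → List Char
  | [] => []
  | '+' :: d :: rest' => d :: '\u0301' :: convertPlusGoA rest'
  | c :: rest => c :: convertPlusGoA rest

def convert_plus_to_acute (text : String) : String :=
  String.mk (convertPlusGoA text.toList)

-- ===== PORT B =====
-- Source B: parts = text.split('+'); keep parts[0]; each later piece starts after a '+':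
-- nonempty piece -> accent its first char; empty piece with another piece after -> '+'+accent plus that piece; trailing empty piece -> '+'.
def convertPlusGoB : List (List Char) → List Char
  | [] => []
  | [] :: rest =>
    match rest with
    | [] => ['+']
    | q :: rest' => '+' :: '\u0301' :: (q ++ convertPlusGoB rest')
  | (c :: cs) :: rest => c :: '\u0301' :: (cs ++ convertPlusGoB rest)

def convert_plus_to_acute_alt (text : String) : String :=
  match text.toList.splitOn '+' with
  | [] => ""                    -- unreachable: split never returns an empty list
  | p :: rest => String.mk (p ++ convertPlusGoB rest)

-- ===== PRECONDITION & SPEC =====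
def Spec_convert_plus_to_acute (text : String) (out : String) : Prop := out = convert_plus_to_acute_alt text
instance (text : String) (out : String) : Decidable (Spec_convert_plus_to_acute text out) := by unfold Spec_convert_plus_to_acute; infer_instance

-- ===== CLAIM (what is proved, stated in full; the proofs are below) =====
def Claim_equal_convert_plus_to_acute : Prop := ∀ (text : String), Dom_convert_plus_to_acute text → Spec_convert_plus_to_acute text (convert_plus_to_acute text)

-- ===== LEMMAS AND PROOFS =====

def convertPlusConv : List (List Char) → List Char
  | [] => []
  | p :: rest => p ++ convertPlusGoB rest

theorem splitOn_char_plus (cs : List Char) :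
    ('+' :: cs).splitOn '+' = [] :: cs.splitOn '+' := by
  simp [List.splitOn, List.splitOnP_cons]

theorem splitOn_char_other (c : Char) (cs : List Char) (h : c ≠ '+') :
    (c :: cs).splitOn '+' = (cs.splitOn '+').modifyHead (c :: ·) := by
  simp [List.splitOn, List.splitOnP_cons, h]

theorem splitOn_char_ne_nil (cs : List Char) : cs.splitOn '+' ≠ [] :=
  List.splitOnP_ne_nil _ cs

theorem convertPlusGoA_cons_ne (c : Char) (rest : List Char) (hc : c ≠ '+') :
    convertPlusGoA (c :: rest) = c :: convertPlusGoA rest := by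
  rw [convertPlusGoA.eq_def]
  split <;> simp_all

theorem convertPlusGoA_eq (cs : List Char) :
    convertPlusGoA cs = convertPlusConv (cs.splitOn '+') := by
  induction cs using convertPlusGoA.induct with
  | case1 => rfl
  | case2 d rest' ih =>
    rcases hd : rest'.splitOn '+' with _ | ⟨q, r⟩
    · exact absurd hd (splitOn_char_ne_nil rest')
    · by_cases hdp : d = '+'
      · subst hdp
        simp only [convertPlusGoA, splitOn_char_plus, hd, convertPlusConv,
          convertPlusGoB, ih, List.nil_append]
      · simp only [convertPlusGoA, splitOn_char_plus, splitOn_char_other d rest' hdp,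
          hd, List.modifyHead, convertPlusConv, convertPlusGoB, ih,
          List.nil_append]
  | case3 c rest h ih =>
    by_cases hc : c = '+'
    · rcases rest with _ | ⟨d, r⟩
      · subst hc
        simp [convertPlusGoA, splitOn_char_plus,
          convertPlusConv, convertPlusGoB]
      · exact (h d r hc rfl).elim
    · rcases hd : rest.splitOn '+' with _ | ⟨q, r⟩
      · exact absurd hd (splitOn_char_ne_nil rest)
      · rw [convertPlusGoA_cons_ne c rest hc, splitOn_char_other c rest hc, hd]
        simp [List.modifyHead, convertPlusConv, ih, hd]

-- ===== VERDICT (by name: the statement is the Claim_ definition above) =====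
theorem convert_plus_to_acute_spec : Claim_equal_convert_plus_to_acute := by
  intro text _
  unfold Spec_convert_plus_to_acute convert_plus_to_acute convert_plus_to_acute_alt
  rcases h : text.toList.splitOn '+' with _ | ⟨p, rest⟩
  · exact absurd h (splitOn_char_ne_nil _)
  · rw [convertPlusGoA_eq, h]; rfl
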